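-- pv_equiv track=rewrite | github.com/xiaxinmeng/DynamicTypinginPython | decide_dynamic_typing.py | calRDTPair
-- ===== SOURCE A (Python) =====
-- def calRDTPair(dynamiclist,	RDTcountDic ):
--
-- 	RDTDic = {}
-- 	for item in dynamiclist:
-- 		path,scope,category,name,itype,lineno,content = item[0],item[1],item[2],item[3],item[4],item[5],item[6]
-- 		if path in RDTDic.keys():
-- 			if scope in RDTDic[path].keys():
-- 				if category in RDTDic[path][scope].keys():
-- 					if name in RDTDic[path][scope][category].keys():
-- 						RDTDic[path][scope][category][name].append((itype,lineno))
-- 					else: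
-- 						RDTDic[path][scope][category][name] = [(itype,lineno)]
-- 				else:
-- 					RDTDic[path][scope][category] = {name:[(itype,lineno)]}
--
-- 			else:
-- 				RDTDic[path][scope]= {category:{name:[(itype,lineno)]}}
-- 		else:
-- 			RDTDic[path]={scope:{category:{name:[(itype,lineno)]}}}
--
--
-- 	for path in RDTDic.keys():
-- 		count = 0
-- 		for scope in  RDTDic[path].keys():
-- 			for category in RDTDic[path][scope].keys():
-- 				count = count + len(RDTDic[path][scope][category].keys())
-- 		RDTcountDic[path] = {"RDTPair":count}
-- 	return RDTcountDic
-- ===== SOURCE B (Python) =====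
-- def calRDTPair(dynamiclist, RDTcountDic):
--     # Flat one-pass version: the per-path count in A equals the number of
--     # distinct (scope, category, name) triples under that path.
--     seen = set()
--     count = {}
--     for item in dynamiclist:
--         path, scope, category, name, itype, lineno, content = \
--             item[0], item[1], item[2], item[3], item[4], item[5], item[6]
--         key = (path, scope, category, name)
--         if key not in seen:
--             seen.add(key)
--             count[path] = count.get(path, 0) + 1
--     for path in count:
--         RDTcountDic[path] = {"RDTPair": count[path]}
--     return RDTcountDic
-- ===== Notes on version B (the rewrite author's own statement) =====
-- stated objective: simpler
-- what changed: Replaces the 4-level nested dict of (itype,lineno) lists with a single pass keeping a flat set of seen (path,scope,category,name) tuples and an insertion-ordered per-path counter; the nested structure is never built.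
import Mathlib
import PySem

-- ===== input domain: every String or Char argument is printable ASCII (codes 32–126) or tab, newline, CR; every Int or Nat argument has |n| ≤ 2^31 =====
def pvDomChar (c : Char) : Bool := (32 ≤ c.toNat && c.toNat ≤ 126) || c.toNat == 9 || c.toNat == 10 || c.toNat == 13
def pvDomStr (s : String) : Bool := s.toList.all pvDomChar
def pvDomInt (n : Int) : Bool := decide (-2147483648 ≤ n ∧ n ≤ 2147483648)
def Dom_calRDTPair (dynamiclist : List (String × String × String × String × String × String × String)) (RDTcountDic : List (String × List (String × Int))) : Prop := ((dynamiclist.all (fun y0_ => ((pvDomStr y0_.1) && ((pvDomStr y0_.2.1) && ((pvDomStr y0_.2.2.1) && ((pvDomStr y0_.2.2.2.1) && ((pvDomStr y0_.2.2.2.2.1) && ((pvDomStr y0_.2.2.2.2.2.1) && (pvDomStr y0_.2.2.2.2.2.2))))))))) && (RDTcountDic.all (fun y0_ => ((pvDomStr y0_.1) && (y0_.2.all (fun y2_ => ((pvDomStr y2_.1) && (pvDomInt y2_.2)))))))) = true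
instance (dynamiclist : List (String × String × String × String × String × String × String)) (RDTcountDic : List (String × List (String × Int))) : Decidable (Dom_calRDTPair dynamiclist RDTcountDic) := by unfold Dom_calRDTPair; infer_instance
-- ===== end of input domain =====

-- B replaces A's 4-level nested dict (and its nested counting traversal) by one flat pass
-- with a set of seen (path,scope,category,name) tuples and a per-path counter (objective: simpler).
-- A mutates its RDTcountDic argument in place; the equivalence proved here is about the RETURN value.

abbrev PvItem := String × String × String × String × String × String × String
abbrev PvNameD := PySem.Dict String (List (String × String))
abbrev PvCatD := PySem.Dict String PvNameD
abbrev PvScopeD := PySem.Dict String PvCatD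
abbrev PvPathD := PySem.Dict String PvScopeD

-- ===== PORT A =====
def calRDTPair_stepA (d : PvPathD) (item : PvItem) : PvPathD :=
  let path := item.1; let scope := item.2.1; let category := item.2.2.1
  let name := item.2.2.2.1; let itype := item.2.2.2.2.1; let lineno := item.2.2.2.2.2.1
  match d.get? path with
  | some sd =>
    match sd.get? scope with
    | some cd =>
      match cd.get? category with
      | some nd =>
        match nd.get? name with
        | some lst =>
          d.insert path (sd.insert scope (cd.insert category (nd.insert name (lst ++ [(itype, lineno)]))))
        | none =>
          d.insert path (sd.insert scope (cd.insert category (nd.insert name [(itype, lineno)])))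
      | none =>
        d.insert path (sd.insert scope (cd.insert category (PySem.Dict.ofList [(name, [(itype, lineno)])])))
    | none =>
      d.insert path (sd.insert scope (PySem.Dict.ofList [(category, PySem.Dict.ofList [(name, [(itype, lineno)])])]))
  | none =>
    d.insert path (PySem.Dict.ofList [(scope, PySem.Dict.ofList [(category, PySem.Dict.ofList [(name, [(itype, lineno)])])])])

def calRDTPair (dynamiclist : List (String × String × String × String × String × String × String)) (RDTcountDic : List (String × List (String × Int))) : List (String × List (String × Int)) :=
  let RDTDic : PvPathD := dynamiclist.foldl calRDTPair_stepA PySem.Dict.empty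
  (RDTDic.keys.foldl (fun acc path =>
    let sub := RDTDic.getD path PySem.Dict.empty
    let count : Int := sub.keys.foldl (fun c scope =>
      let cd := sub.getD scope PySem.Dict.empty
      cd.keys.foldl (fun c2 category =>
        c2 + PySem.List.len (cd.getD category PySem.Dict.empty).keys) c) 0
    acc.insert path [("RDTPair", count)]) (PySem.Dict.mk RDTcountDic)).items

-- ===== PORT B =====
def calRDTPair_stepB (st : PySem.Set (String × String × String × String) × PySem.Dict String Int) (item : PvItem) : PySem.Set (String × String × String × String) × PySem.Dict String Int :=
  let key := (item.1, item.2.1, item.2.2.1, item.2.2.2.1)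
  if key ∈ st.1 then st
  else (PySem.Set.add st.1 key, st.2.insert item.1 (st.2.getD item.1 0 + 1))

def calRDTPair_alt (dynamiclist : List (String × String × String × String × String × String × String)) (RDTcountDic : List (String × List (String × Int))) : List (String × List (String × Int)) :=
  let st := dynamiclist.foldl calRDTPair_stepB (PySem.Set.empty, PySem.Dict.empty)
  (st.2.items.foldl (fun acc p => acc.insert p.1 [("RDTPair", p.2)]) (PySem.Dict.mk RDTcountDic)).items

-- ===== PRECONDITION & SPEC =====
def Spec_calRDTPair (dynamiclist : List (String × String × String × String × String × String × String)) (RDTcountDic : List (String × List (String × Int))) (out : List (String × List (String × Int))) : Prop := out = calRDTPair_alt dynamiclist RDTcountDic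
instance (dynamiclist : List (String × String × String × String × String × String × String)) (RDTcountDic : List (String × List (String × Int))) (out : List (String × List (String × Int))) : Decidable (Spec_calRDTPair dynamiclist RDTcountDic out) := by unfold Spec_calRDTPair; infer_instance

-- ===== CLAIM (what is proved, stated in full; the proofs are below) =====
def Claim_equal_calRDTPair : Prop := ∀ (dynamiclist : List (String × String × String × String × String × String × String)) (RDTcountDic : List (String × List (String × Int))), Dom_calRDTPair dynamiclist RDTcountDic → Spec_calRDTPair dynamiclist RDTcountDic (calRDTPair dynamiclist RDTcountDic)

-- ===== LEMMAS AND PROOFS =====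

-- measures: how many names live below a node of A's nested dict
def pvM2 (nd : PvNameD) : Nat := nd.keys.length
def pvM1 (cd : PvCatD) : Nat := (cd.values.map pvM2).sum
def pvM0 (sd : PvScopeD) : Nat := (sd.values.map pvM1).sum

-- the chained lookups a tuple key performs in A's nested dict
def pvLk2 (cd : PvCatD) (k : String × String) : Option (List (String × String)) :=
  (cd.get? k.1).bind fun nd => nd.get? k.2
def pvLk3 (sd : PvScopeD) (k : String × String × String) : Option (List (String × String)) :=
  (sd.get? k.1).bind fun cd => pvLk2 cd k.2
def pvLk4 (d : PvPathD) (k : String × String × String × String) : Option (List (String × String)) :=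
  (d.get? k.1).bind fun sd => pvLk3 sd k.2

-- nodup keys on every level
def pvWF2 (cd : PvCatD) : Prop := cd.keys.Nodup ∧ ∀ c nd, cd.get? c = some nd → nd.keys.Nodup
def pvWF1 (sd : PvScopeD) : Prop := sd.keys.Nodup ∧ ∀ s cd, sd.get? s = some cd → pvWF2 cd
def pvWF (d : PvPathD) : Prop := d.keys.Nodup ∧ ∀ p sd, d.get? p = some sd → pvWF1 sd

-- the correspondence between A's nested state and B's flat state
def pvInv (d : PvPathD) (seen : PySem.Set (String × String × String × String)) (count : PySem.Dict String Int) : Prop :=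
  pvWF d ∧
  d.keys = count.keys ∧
  (∀ k, (pvLk4 d k).isSome ↔ k ∈ seen) ∧
  (∀ p sd, d.get? p = some sd → count.getD p 0 = (pvM0 sd : Int))

-- generic list/dict helpers ---------------------------------------------------

theorem pv_map_replace_id {β : Type} (l : List (String × β)) (s : String) (v' : β)
    (h : s ∉ l.map Prod.fst) :
    l.map (fun q => if q.1 == s then (s, v') else q) = l := by
  induction l with
  | nil => rfl
  | cons q t ih =>
      simp only [List.map_cons, List.mem_cons, not_or] at h ⊢
      rw [if_neg (by simp [Ne.symm h.1]), ih h.2]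

theorem pv_sum_replace {β : Type} (m : β → Nat) (l : List (String × β)) (s : String) (v v' : β)
    (hnd : (l.map Prod.fst).Nodup) (hm : (s, v) ∈ l) :
    ((l.map (fun q => if q.1 == s then (s, v') else q)).map (fun q => m q.2)).sum + m v
      = (l.map (fun q => m q.2)).sum + m v' := by
  induction l with
  | nil => simp at hm
  | cons q t ih =>
      simp only [List.map_cons, List.nodup_cons] at hnd
      rcases List.mem_cons.mp hm with h | h
      · subst h
        simp only [List.map_cons, BEq.rfl]
        rw [pv_map_replace_id t s v' hnd.1]
        simp [List.sum_cons]; omega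
      · have hne : q.1 ≠ s := by
          rintro rfl; exact hnd.1 (by simpa using List.mem_map_of_mem (f := Prod.fst) h)
        have hq : (if (q.1 == s) = true then (s, v') else q) = q := if_neg (by simp [hne])
        simp only [List.map_cons, hq, List.sum_cons]
        have := ih hnd.2 h
        omega

-- sum of a measure over values, after overwriting an existing key
theorem pv_sum_insert_mem {β : Type} (m : β → Nat) (dd : PySem.Dict String β) (s : String) (v v' : β)
    (hnd : dd.keys.Nodup) (hget : dd.get? s = some v) :
    ((dd.insert s v').values.map m).sum + m v = ((dd.values.map m).sum + m v') := by
  have hc : dd.contains s = true := by simp [PySem.Dict.contains_eq_isSome_get?, hget]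
  have hitems := PySem.Dict.items_insert_of_contains (d := dd) (v := v') hc
  have hmem : (s, v) ∈ dd.items := PySem.Dict.mem_items_of_get?_eq_some dd hget
  have hkeys : (dd.items.map Prod.fst).Nodup := hnd
  calc ((dd.insert s v').values.map m).sum + m v
      = ((dd.items.map (fun q => if q.1 == s then (s, v') else q)).map (fun q => m q.2)).sum + m v := by
        simp only [PySem.Dict.values, hitems, List.map_map]; rfl
    _ = (dd.items.map (fun q => m q.2)).sum + m v' := pv_sum_replace m dd.items s v v' hkeys hmem
    _ = (dd.values.map m).sum + m v' := by simp only [PySem.Dict.values, List.map_map]; rfl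

-- sum of a measure over values, after inserting a fresh key
theorem pv_sum_insert_fresh {β : Type} (m : β → Nat) (dd : PySem.Dict String β) (s : String) (v' : β)
    (hget : dd.get? s = none) :
    ((dd.insert s v').values.map m).sum = (dd.values.map m).sum + m v' := by
  have hc : dd.contains s = false := by simp [PySem.Dict.contains_eq_isSome_get?, hget]
  have hitems := PySem.Dict.items_insert_of_not_contains (d := dd) (v := v') hc
  simp [PySem.Dict.values, hitems]

theorem pv_get?_single {β : Type} (s t : String) (v : β) :
    (PySem.Dict.ofList [(s, v)]).get? t = if t = s then some v else none := by
  show (PySem.Dict.mk [(s, v)]).get? t = _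
  rw [PySem.Dict.get?_mk_cons]
  rcases h : (s == t) with _ | _
  · have hne : ¬ t = s := fun he => by subst he; simp at h
    rw [if_neg (by simp), if_neg hne]
    rfl
  · have he : s = t := eq_of_beq h
    subst he
    rw [if_pos rfl, if_pos (by simp)]

theorem pv_keys_insert_fresh {β : Type} (dd : PySem.Dict String β) (s : String) (v : β)
    (h : dd.get? s = none) : (dd.insert s v).keys = dd.keys ++ [s] :=
  PySem.Dict.keys_insert_of_not_contains dd v (by simp [PySem.Dict.contains_eq_isSome_get?, h])

theorem pv_keys_insert_mem {β : Type} (dd : PySem.Dict String β) (s : String) (v w : β)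
    (h : dd.get? s = some v) : (dd.insert s w).keys = dd.keys :=
  PySem.Dict.keys_insert_of_contains dd w (by simp [PySem.Dict.contains_eq_isSome_get?, h])

-- singleton nested dicts ------------------------------------------------------

theorem pv_lk2_single (c n : String) (x : String × String) (k : String × String) :
    pvLk2 (PySem.Dict.ofList [(c, PySem.Dict.ofList [(n, [x])])]) k
      = if k = (c, n) then some [x] else none := by
  obtain ⟨kc, kn⟩ := k
  simp only [pvLk2, pv_get?_single]
  by_cases h1 : kc = c
  · subst h1
    by_cases h2 : kn = n
    · subst h2; simp [pv_get?_single]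
    · simp [pv_get?_single, h2]
  · simp [h1]

theorem pv_lk3_single (s c n : String) (x : String × String) (k : String × String × String) :
    pvLk3 (PySem.Dict.ofList [(s, PySem.Dict.ofList [(c, PySem.Dict.ofList [(n, [x])])])]) k
      = if k = (s, c, n) then some [x] else none := by
  obtain ⟨ks, kr⟩ := k
  simp only [pvLk3, pv_get?_single]
  by_cases h1 : ks = s
  · subst h1; simp [pv_lk2_single]
  · simp [h1]

theorem pv_wf2_single (c n : String) (x : String × String) :
    pvWF2 (PySem.Dict.ofList [(c, PySem.Dict.ofList [(n, [x])])]) := by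
  constructor
  · show [c].Nodup; simp
  · intro c' nd hg
    rw [pv_get?_single] at hg
    split at hg
    · cases hg; show [n].Nodup; simp
    · cases hg

theorem pv_wf1_single (s c n : String) (x : String × String) :
    pvWF1 (PySem.Dict.ofList [(s, PySem.Dict.ofList [(c, PySem.Dict.ofList [(n, [x])])])]) := by
  constructor
  · show [s].Nodup; simp
  · intro s' cd hg
    rw [pv_get?_single] at hg
    split at hg
    · cases hg; exact pv_wf2_single c n x
    · cases hg

theorem pv_m1_single (c n : String) (x : String × String) :
    pvM1 (PySem.Dict.ofList [(c, PySem.Dict.ofList [(n, [x])])]) = 1 := rfl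

theorem pv_m0_single (s c n : String) (x : String × String) :
    pvM0 (PySem.Dict.ofList [(s, PySem.Dict.ofList [(c, PySem.Dict.ofList [(n, [x])])])]) = 1 := rfl

-- lookups through insert ------------------------------------------------------

theorem pv_lk2_insert (cd : PvCatD) (c : String) (nd' : PvNameD) (k : String × String) :
    pvLk2 (cd.insert c nd') k = if k.1 = c then nd'.get? k.2 else pvLk2 cd k := by
  simp only [pvLk2, PySem.Dict.get?_insert]
  split <;> rfl

theorem pv_lk3_insert (sd : PvScopeD) (s : String) (cd' : PvCatD) (k : String × String × String) :
    pvLk3 (sd.insert s cd') k = if k.1 = s then pvLk2 cd' k.2 else pvLk3 sd k := by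
  simp only [pvLk3, PySem.Dict.get?_insert]
  split <;> rfl

theorem pv_lk4_insert (d : PvPathD) (p : String) (sd' : PvScopeD) (k : String × String × String × String) :
    pvLk4 (d.insert p sd') k = if k.1 = p then pvLk3 sd' k.2 else pvLk4 d k := by
  simp only [pvLk4, PySem.Dict.get?_insert]
  split <;> rfl

-- WF through insert -----------------------------------------------------------

theorem pv_wf2_insert (cd : PvCatD) (c : String) (nd' : PvNameD)
    (h : pvWF2 cd) (h' : nd'.keys.Nodup) : pvWF2 (cd.insert c nd') := by
  refine ⟨PySem.Dict.nodup_keys_insert cd c nd' h.1, ?_⟩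
  intro c' nd hg
  rw [PySem.Dict.get?_insert] at hg
  split at hg
  · cases hg; exact h'
  · exact h.2 c' nd hg

theorem pv_wf1_insert (sd : PvScopeD) (s : String) (cd' : PvCatD)
    (h : pvWF1 sd) (h' : pvWF2 cd') : pvWF1 (sd.insert s cd') := by
  refine ⟨PySem.Dict.nodup_keys_insert sd s cd' h.1, ?_⟩
  intro s' cd hg
  rw [PySem.Dict.get?_insert] at hg
  split at hg
  · cases hg; exact h'
  · exact h.2 s' cd hg

theorem pv_wf_insert (d : PvPathD) (p : String) (sd' : PvScopeD)
    (h : pvWF d) (h' : pvWF1 sd') : pvWF (d.insert p sd') := by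
  refine ⟨PySem.Dict.nodup_keys_insert d p sd' h.1, ?_⟩
  intro p' sd hg
  rw [PySem.Dict.get?_insert] at hg
  split at hg
  · cases hg; exact h'
  · exact h.2 p' sd hg

-- measures through insert -----------------------------------------------------

theorem pv_m2_insert_fresh (nd : PvNameD) (n : String) (l : List (String × String))
    (h : nd.get? n = none) : pvM2 (nd.insert n l) = pvM2 nd + 1 := by
  simp [pvM2, pv_keys_insert_fresh nd n l h]

theorem pv_m2_insert_mem (nd : PvNameD) (n : String) (l l' : List (String × String))
    (h : nd.get? n = some l) : pvM2 (nd.insert n l') = pvM2 nd := by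
  simp [pvM2, pv_keys_insert_mem nd n l l' h]

theorem pv_m1_insert_fresh (cd : PvCatD) (c : String) (nd' : PvNameD)
    (h : cd.get? c = none) : pvM1 (cd.insert c nd') = pvM1 cd + pvM2 nd' :=
  pv_sum_insert_fresh pvM2 cd c nd' h

theorem pv_m1_insert_mem (cd : PvCatD) (c : String) (nd nd' : PvNameD)
    (hnd : cd.keys.Nodup) (h : cd.get? c = some nd) :
    pvM1 (cd.insert c nd') + pvM2 nd = pvM1 cd + pvM2 nd' :=
  pv_sum_insert_mem pvM2 cd c nd nd' hnd h

theorem pv_m0_insert_fresh (sd : PvScopeD) (s : String) (cd' : PvCatD)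
    (h : sd.get? s = none) : pvM0 (sd.insert s cd') = pvM0 sd + pvM1 cd' :=
  pv_sum_insert_fresh pvM1 sd s cd' h

theorem pv_m0_insert_mem (sd : PvScopeD) (s : String) (cd cd' : PvCatD)
    (hnd : sd.keys.Nodup) (h : sd.get? s = some cd) :
    pvM0 (sd.insert s cd') + pvM1 cd = pvM0 sd + pvM1 cd' :=
  pv_sum_insert_mem pvM1 sd s cd cd' hnd h

-- the invariant ---------------------------------------------------------------

theorem pvInv_init : pvInv PySem.Dict.empty PySem.Set.empty PySem.Dict.empty := by
  refine ⟨⟨by simp [PySem.Dict.keys_empty], ?_⟩, by simp [PySem.Dict.keys_empty], ?_, ?_⟩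
  · intro p sd hg; rw [PySem.Dict.get?_empty] at hg; cases hg
  · intro k
    simp [pvLk4, PySem.Dict.get?_empty, PySem.Set.empty]
  · intro p sd hg; rw [PySem.Dict.get?_empty] at hg; cases hg

-- one insertion step, seen from the membership side: each level adds exactly one key
theorem pv_lkstep2 (cd : PvCatD) (c : String) (nd' : PvNameD) (t1 : String)
    (h1 : ∀ k0 : String, (nd'.get? k0).isSome ↔ (pvLk2 cd (c, k0)).isSome ∨ k0 = t1) :
    ∀ k1 : String × String, (pvLk2 (cd.insert c nd') k1).isSome ↔ (pvLk2 cd k1).isSome ∨ k1 = (c, t1) := by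
  intro k1
  rw [pv_lk2_insert]
  by_cases h : k1.1 = c
  · rw [if_pos h, h1 k1.2]
    have he : ((c, k1.2) : String × String) = k1 := by rw [← h]
    rw [he]
    simp [Prod.ext_iff, h]
  · rw [if_neg h]
    simp [Prod.ext_iff, h]

theorem pv_lkstep3 (sd : PvScopeD) (s : String) (cd' : PvCatD) (t2 : String × String)
    (h2 : ∀ k1 : String × String, (pvLk2 cd' k1).isSome ↔ (pvLk3 sd (s, k1)).isSome ∨ k1 = t2) :
    ∀ k2 : String × String × String, (pvLk3 (sd.insert s cd') k2).isSome ↔ (pvLk3 sd k2).isSome ∨ k2 = (s, t2) := by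
  intro k2
  rw [pv_lk3_insert]
  by_cases h : k2.1 = s
  · rw [if_pos h, h2 k2.2]
    have he : ((s, k2.2) : String × String × String) = k2 := by rw [← h]
    rw [he]
    simp [Prod.ext_iff, h]
  · rw [if_neg h]
    simp [Prod.ext_iff, h]

theorem pv_lkstep4 (d : PvPathD) (p : String) (sd' : PvScopeD) (t3 : String × String × String)
    (h3 : ∀ k2 : String × String × String, (pvLk3 sd' k2).isSome ↔ (pvLk4 d (p, k2)).isSome ∨ k2 = t3) :
    ∀ k : String × String × String × String, (pvLk4 (d.insert p sd') k).isSome ↔ (pvLk4 d k).isSome ∨ k = (p, t3) := by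
  intro k
  rw [pv_lk4_insert]
  by_cases h : k.1 = p
  · rw [if_pos h, h3 k.2]
    have he : ((p, k.2) : String × String × String × String) = k := by rw [← h]
    rw [he]
    simp [Prod.ext_iff, h]
  · rw [if_neg h]
    simp [Prod.ext_iff, h]

theorem pv_seen_new (d d' : PvPathD) (seen : PySem.Set (String × String × String × String))
    (key : String × String × String × String)
    (hseen : ∀ k, (pvLk4 d k).isSome ↔ k ∈ seen)
    (h4 : ∀ k, (pvLk4 d' k).isSome ↔ (pvLk4 d k).isSome ∨ k = key) :
    ∀ k, (pvLk4 d' k).isSome ↔ k ∈ seen ++ [key] := by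
  intro k
  rw [h4 k, hseen k]
  simp

theorem pv_seen_old (d d' : PvPathD) (seen : PySem.Set (String × String × String × String))
    (key : String × String × String × String)
    (hseen : ∀ k, (pvLk4 d k).isSome ↔ k ∈ seen)
    (h4 : ∀ k, (pvLk4 d' k).isSome ↔ (pvLk4 d k).isSome ∨ k = key)
    (hk : key ∈ seen) :
    ∀ k, (pvLk4 d' k).isSome ↔ k ∈ seen := by
  intro k
  rw [h4 k, hseen k]
  constructor
  · rintro (h | rfl)
    · exact h
    · exact hk
  · exact Or.inl

theorem pv_count_some (d : PvPathD) (count : PySem.Dict String Int) (p : String) (sd : PvScopeD)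
    (hkeys : d.keys = count.keys) (hd : d.get? p = some sd) : ∃ v, count.get? p = some v := by
  have hp : p ∈ d.keys := by
    by_contra hcc
    rw [← PySem.Dict.get?_eq_none_iff_not_mem_keys] at hcc
    rw [hd] at hcc; cases hcc
  rw [hkeys] at hp
  rcases ho : count.get? p with _ | v
  · rw [PySem.Dict.get?_eq_none_iff_not_mem_keys] at ho; exact absurd hp ho
  · exact ⟨v, rfl⟩

theorem pvInv_step (d : PvPathD) (seen : PySem.Set (String × String × String × String))
    (count : PySem.Dict String Int) (it : PvItem) (h : pvInv d seen count) :
    pvInv (calRDTPair_stepA d it) (calRDTPair_stepB (seen, count) it).1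
      (calRDTPair_stepB (seen, count) it).2 := by
  obtain ⟨hwf, hkeys, hseen, hcnt⟩ := h
  obtain ⟨p, s, c, n, i0, l0, c0⟩ := it
  rcases hd : d.get? p with _ | sd
  · -- path is fresh
    have hnot : (p, s, c, n) ∉ seen := fun hm => by
      have := (hseen _).mpr hm; simp [pvLk4, hd] at this
    have hcp : count.get? p = none := by
      rw [PySem.Dict.get?_eq_none_iff_not_mem_keys, ← hkeys,
        ← PySem.Dict.get?_eq_none_iff_not_mem_keys]
      exact hd
    have h0 : count.getD p 0 = 0 := PySem.Dict.getD_of_get?_eq_none count 0 hcp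
    have h4 := pv_lkstep4 d p
      (PySem.Dict.ofList [(s, PySem.Dict.ofList [(c, PySem.Dict.ofList [(n, [(i0, l0)])])])])
      (s, c, n) (fun k2 => by
      rw [pv_lk3_single]
      simp [pvLk4, hd])
    simp only [calRDTPair_stepA, calRDTPair_stepB, hd]
    rw [if_neg hnot, PySem.Set.add_of_not_mem hnot]
    refine ⟨pv_wf_insert d p _ hwf (pv_wf1_single s c n (i0, l0)), ?_,
      pv_seen_new d _ seen _ hseen h4, ?_⟩
    · rw [pv_keys_insert_fresh d p _ hd, pv_keys_insert_fresh count p _ hcp, hkeys]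
    · intro p' sd' hg
      rw [PySem.Dict.get?_insert] at hg
      rw [PySem.Dict.getD_insert]
      by_cases hp : p' = p
      · rw [if_pos hp] at hg; rw [if_pos hp]
        cases hg
        rw [h0, pv_m0_single]
        norm_num
      · rw [if_neg hp] at hg; rw [if_neg hp]
        exact hcnt p' sd' hg
  · have hwf1 : pvWF1 sd := hwf.2 p sd hd
    obtain ⟨cv, hcv⟩ := pv_count_some d count p sd hkeys hd
    rcases hs : sd.get? s with _ | cd
    · -- scope is fresh
      have hnot : (p, s, c, n) ∉ seen := fun hm => by
        have := (hseen _).mpr hm; simp [pvLk4, pvLk3, hd, hs] at this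
      have h4 := pv_lkstep4 d p
        (sd.insert s (PySem.Dict.ofList [(c, PySem.Dict.ofList [(n, [(i0, l0)])])]))
        (s, c, n) (fun k2 => by
        rw [pv_lkstep3 sd s
          (PySem.Dict.ofList [(c, PySem.Dict.ofList [(n, [(i0, l0)])])]) (c, n) (fun k1 => by
          rw [pv_lk2_single]
          simp [pvLk3, hs]) k2]
        simp [pvLk4, hd])
      simp only [calRDTPair_stepA, calRDTPair_stepB, hd, hs]
      rw [if_neg hnot, PySem.Set.add_of_not_mem hnot]
      refine ⟨pv_wf_insert d p _ hwf (pv_wf1_insert sd s _ hwf1 (pv_wf2_single c n (i0, l0))), ?_,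
        pv_seen_new d _ seen _ hseen h4, ?_⟩
      · rw [pv_keys_insert_mem d p sd _ hd, pv_keys_insert_mem count p cv _ hcv, hkeys]
      · intro p' sd' hg
        rw [PySem.Dict.get?_insert] at hg
        rw [PySem.Dict.getD_insert]
        by_cases hp : p' = p
        · rw [if_pos hp] at hg; rw [if_pos hp]
          cases hg
          rw [pv_m0_insert_fresh sd s _ hs, pv_m1_single, hcnt p sd hd]
          push_cast; ring
        · rw [if_neg hp] at hg; rw [if_neg hp]
          exact hcnt p' sd' hg
    · have hwf2 : pvWF2 cd := hwf1.2 s cd hs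
      rcases hc : cd.get? c with _ | nd
      · -- category is fresh
        have hnot : (p, s, c, n) ∉ seen := fun hm => by
          have := (hseen _).mpr hm; simp [pvLk4, pvLk3, pvLk2, hd, hs, hc] at this
        have h4 := pv_lkstep4 d p
          (sd.insert s (cd.insert c (PySem.Dict.ofList [(n, [(i0, l0)])])))
          (s, c, n) (fun k2 => by
          rw [pv_lkstep3 sd s (cd.insert c (PySem.Dict.ofList [(n, [(i0, l0)])])) (c, n) (fun k1 => by
            rw [pv_lkstep2 cd c (PySem.Dict.ofList [(n, [(i0, l0)])]) n (fun k0 => by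
              rw [pv_get?_single]
              simp [pvLk2, hc]) k1]
            simp [pvLk3, hs]) k2]
          simp [pvLk4, hd])
        simp only [calRDTPair_stepA, calRDTPair_stepB, hd, hs, hc]
        rw [if_neg hnot, PySem.Set.add_of_not_mem hnot]
        refine ⟨pv_wf_insert d p _ hwf (pv_wf1_insert sd s _ hwf1
          (pv_wf2_insert cd c _ hwf2 (by show [n].Nodup; simp))), ?_,
          pv_seen_new d _ seen _ hseen h4, ?_⟩
        · rw [pv_keys_insert_mem d p sd _ hd, pv_keys_insert_mem count p cv _ hcv, hkeys]
        · intro p' sd' hg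
          rw [PySem.Dict.get?_insert] at hg
          rw [PySem.Dict.getD_insert]
          by_cases hp : p' = p
          · rw [if_pos hp] at hg; rw [if_pos hp]
            cases hg
            have hm1 : pvM1 (cd.insert c (PySem.Dict.ofList [(n, [(i0, l0)])])) = pvM1 cd + 1 := by
              rw [pv_m1_insert_fresh cd c _ hc]; rfl
            have hm0 := pv_m0_insert_mem sd s cd (cd.insert c (PySem.Dict.ofList [(n, [(i0, l0)])])) hwf1.1 hs
            rw [hm1] at hm0
            rw [hcnt p sd hd]
            have he : pvM0 (sd.insert s (cd.insert c (PySem.Dict.ofList [(n, [(i0, l0)])]))) = pvM0 sd + 1 := by omega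
            rw [he]
            push_cast; ring
          · rw [if_neg hp] at hg; rw [if_neg hp]
            exact hcnt p' sd' hg
      · have hndk : nd.keys.Nodup := hwf2.2 c nd hc
        rcases hn : nd.get? n with _ | lst
        · -- name is fresh
          have h4 := pv_lkstep4 d p
            (sd.insert s (cd.insert c (nd.insert n [(i0, l0)])))
            (s, c, n) (fun k2 => by
            rw [pv_lkstep3 sd s (cd.insert c (nd.insert n [(i0, l0)])) (c, n) (fun k1 => by
              rw [pv_lkstep2 cd c (nd.insert n [(i0, l0)]) n (fun k0 => by
                rw [PySem.Dict.get?_insert]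
                simp only [pvLk2, hc]
                by_cases h0 : k0 = n
                · subst h0; simp [hn]
                · rw [if_neg h0]; simp [h0]) k1]
              simp [pvLk3, hs]) k2]
            simp [pvLk4, hd])
          have hnot : (p, s, c, n) ∉ seen := fun hm => by
            have := (hseen _).mpr hm; simp [pvLk4, pvLk3, pvLk2, hd, hs, hc, hn] at this
          simp only [calRDTPair_stepA, calRDTPair_stepB, hd, hs, hc, hn]
          rw [if_neg hnot, PySem.Set.add_of_not_mem hnot]
          refine ⟨pv_wf_insert d p _ hwf (pv_wf1_insert sd s _ hwf1
            (pv_wf2_insert cd c _ hwf2 (PySem.Dict.nodup_keys_insert nd n _ hndk))), ?_,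
            pv_seen_new d _ seen _ hseen h4, ?_⟩
          · rw [pv_keys_insert_mem d p sd _ hd, pv_keys_insert_mem count p cv _ hcv, hkeys]
          · intro p' sd' hg
            rw [PySem.Dict.get?_insert] at hg
            rw [PySem.Dict.getD_insert]
            by_cases hp : p' = p
            · rw [if_pos hp] at hg; rw [if_pos hp]
              cases hg
              have hm2 : pvM2 (nd.insert n [(i0, l0)]) = pvM2 nd + 1 :=
                pv_m2_insert_fresh nd n _ hn
              have hm1 := pv_m1_insert_mem cd c nd (nd.insert n [(i0, l0)]) hwf2.1 hc
              rw [hm2] at hm1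
              have hm0 := pv_m0_insert_mem sd s cd (cd.insert c (nd.insert n [(i0, l0)])) hwf1.1 hs
              rw [hcnt p sd hd]
              have he : pvM0 (sd.insert s (cd.insert c (nd.insert n [(i0, l0)]))) = pvM0 sd + 1 := by omega
              rw [he]
              push_cast; ring
            · rw [if_neg hp] at hg; rw [if_neg hp]
              exact hcnt p' sd' hg
        · -- tuple already present: B's state is unchanged
          have h4 := pv_lkstep4 d p
            (sd.insert s (cd.insert c (nd.insert n (lst ++ [(i0, l0)]))))
            (s, c, n) (fun k2 => by
            rw [pv_lkstep3 sd s (cd.insert c (nd.insert n (lst ++ [(i0, l0)]))) (c, n) (fun k1 => by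
              rw [pv_lkstep2 cd c (nd.insert n (lst ++ [(i0, l0)])) n (fun k0 => by
                rw [PySem.Dict.get?_insert]
                simp only [pvLk2, hc]
                by_cases h0 : k0 = n
                · subst h0; simp [hn]
                · rw [if_neg h0]; simp [h0]) k1]
              simp [pvLk3, hs]) k2]
            simp [pvLk4, hd])
          have hmem : (p, s, c, n) ∈ seen :=
            (hseen _).mp (by simp [pvLk4, pvLk3, pvLk2, hd, hs, hc, hn])
          simp only [calRDTPair_stepA, calRDTPair_stepB, hd, hs, hc, hn]
          rw [if_pos hmem]
          refine ⟨pv_wf_insert d p _ hwf (pv_wf1_insert sd s _ hwf1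
            (pv_wf2_insert cd c _ hwf2 (PySem.Dict.nodup_keys_insert nd n _ hndk))), ?_,
            pv_seen_old d _ seen _ hseen h4 hmem, ?_⟩
          · rw [pv_keys_insert_mem d p sd _ hd, hkeys]
          · intro p' sd' hg
            rw [PySem.Dict.get?_insert] at hg
            by_cases hp : p' = p
            · rw [if_pos hp] at hg
              cases hg
              have hm2 : pvM2 (nd.insert n (lst ++ [(i0, l0)])) = pvM2 nd :=
                pv_m2_insert_mem nd n lst _ hn
              have hm1 := pv_m1_insert_mem cd c nd (nd.insert n (lst ++ [(i0, l0)])) hwf2.1 hc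
              rw [hm2] at hm1
              have hm0 := pv_m0_insert_mem sd s cd (cd.insert c (nd.insert n (lst ++ [(i0, l0)]))) hwf1.1 hs
              subst hp
              rw [hcnt p' sd hd]
              have he : pvM0 (sd.insert s (cd.insert c (nd.insert n (lst ++ [(i0, l0)])))) = pvM0 sd := by omega
              rw [he]
            · rw [if_neg hp] at hg
              exact hcnt p' sd' hg

theorem pvInv_foldl (dl : List PvItem) (d : PvPathD)
    (seen : PySem.Set (String × String × String × String)) (count : PySem.Dict String Int)
    (h : pvInv d seen count) :
    pvInv (dl.foldl calRDTPair_stepA d) (dl.foldl calRDTPair_stepB (seen, count)).1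
      (dl.foldl calRDTPair_stepB (seen, count)).2 := by
  induction dl generalizing d seen count with
  | nil => exact h
  | cons it tl ih =>
      have := pvInv_step d seen count it h
      simpa using ih _ _ _ this

-- A's nested counting loop computes pvM0, given nodup keys on every level
theorem pvCount_loop (sd : PvScopeD) (hwf : pvWF1 sd) :
    (sd.keys.foldl (fun c scope =>
      let cd := sd.getD scope PySem.Dict.empty
      cd.keys.foldl (fun c2 category =>
        c2 + PySem.List.len (cd.getD category PySem.Dict.empty).keys) c) 0 : Int)
      = (pvM0 sd : Int) := by
  have hinner : ∀ cd : PvCatD, cd.keys.Nodup → ∀ cin : Int,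
      cd.keys.foldl (fun c2 category =>
        c2 + PySem.List.len (cd.getD category PySem.Dict.empty).keys) cin
        = cin + (pvM1 cd : Int) := by
    intro cd hnd cin
    rw [PySem.List.foldl_add]
    congr 1
    rw [pvM1, PySem.Dict.values_eq_map_keys cd hnd PySem.Dict.empty,
      List.map_map, Nat.cast_list_sum, List.map_map]
    simp only [PySem.List.len_eq]
    rfl
  rw [PySem.List.foldl_congr_mem sd.keys _
    (fun cin scope => cin + (pvM1 (sd.getD scope PySem.Dict.empty) : Int)) 0 ?_]
  · rw [PySem.List.foldl_add]
    rw [pvM0, PySem.Dict.values_eq_map_keys sd hwf.1 PySem.Dict.empty,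
      List.map_map, Nat.cast_list_sum, List.map_map]
    rw [zero_add]
    rfl
  · intro acc scope hmem
    have hsome : ∃ cd, sd.get? scope = some cd := by
      rcases ho : sd.get? scope with _ | cd
      · rw [PySem.Dict.get?_eq_none_iff_not_mem_keys] at ho; exact absurd hmem ho
      · exact ⟨cd, rfl⟩
    obtain ⟨cd, hcd⟩ := hsome
    have hgd : sd.getD scope PySem.Dict.empty = cd :=
      PySem.Dict.getD_of_get?_eq_some sd PySem.Dict.empty hcd
    simp only [hgd]
    exact hinner cd (hwf.2 scope cd hcd).1 acc

-- ===== VERDICT (by name: the statement is the Claim_ definition above) =====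
theorem calRDTPair_spec : Claim_equal_calRDTPair := by
  intro dl rd _
  show calRDTPair dl rd = calRDTPair_alt dl rd
  obtain ⟨hwf, hkeys, hseen, hcnt⟩ :=
    pvInv_foldl dl PySem.Dict.empty PySem.Set.empty PySem.Dict.empty pvInv_init
  simp only [calRDTPair, calRDTPair_alt]
  have hnd : (dl.foldl calRDTPair_stepB (PySem.Set.empty, PySem.Dict.empty)).2.keys.Nodup :=
    hkeys ▸ hwf.1
  rw [PySem.Dict.items_eq_map_keys _ hnd 0, List.foldl_map, ← hkeys]
  apply congrArg PySem.Dict.items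
  apply PySem.List.foldl_congr_mem
  intro acc path hmem
  have hsome : ∃ sd, (dl.foldl calRDTPair_stepA PySem.Dict.empty).get? path = some sd := by
    rcases ho : (dl.foldl calRDTPair_stepA PySem.Dict.empty).get? path with _ | sd
    · rw [PySem.Dict.get?_eq_none_iff_not_mem_keys] at ho; exact absurd hmem ho
    · exact ⟨sd, rfl⟩
  obtain ⟨sd, hg⟩ := hsome
  have hgd : (dl.foldl calRDTPair_stepA PySem.Dict.empty).getD path PySem.Dict.empty = sd :=
    PySem.Dict.getD_of_get?_eq_some _ PySem.Dict.empty hg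
  simp only [hgd]
  rw [pvCount_loop sd (hwf.2 path sd hg), ← hcnt path sd hg]
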